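-- pv_equiv track=rewrite | github.com/chlomcneill/advent-of-code-2015 | Day5/Day5Part2.py | pair_appears_twice_check
-- ===== SOURCE A (Python) =====
-- def find_pairs_of_letters(string):
--     pairs_of_letters = []
--     i = 0
--     while i < (len(string)-1):
--         pairs_of_letters.append(string[i] + string[i+1])
--         i += 1
--     return pairs_of_letters
--
-- def remove_overlapping_pairs(string):
--     pairs = find_pairs_of_letters(string)
--     i = 0
--     while i < (len(pairs)-1):
--         if pairs[i][0] == pairs[i][1] and pairs[i] == pairs[i+1]:
--             del pairs[i+1]
--         i += 1
--     return pairs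
--
-- def pair_appears_twice_check(string):
--     pairs = remove_overlapping_pairs(string)
--     count = 0
--     for pair in pairs:
--         if pairs.count(pair) > 1:
--             count += 1
--     if count > 0:
--         return True
--     else:
--         return False
-- ===== SOURCE B (Python) =====
-- def pair_appears_twice_check(string):
--     n = len(string)
--     for i in range(n - 1):
--         for j in range(i + 2, n - 1):
--             if string[i] == string[j] and string[i + 1] == string[j + 1]:
--                 return True
--     return False
-- ===== Notes on version B (the rewrite author's own statement) =====
-- stated objective: simpler
-- what changed: Replaces A's three-stage pipeline (build a pairs list, delete overlapping duplicates in place, then count duplicates with a list.count scan per element) by a direct two-index scan that looks for an equal letter pair at distance >= 2 and returns on the first hit.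
import Mathlib
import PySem

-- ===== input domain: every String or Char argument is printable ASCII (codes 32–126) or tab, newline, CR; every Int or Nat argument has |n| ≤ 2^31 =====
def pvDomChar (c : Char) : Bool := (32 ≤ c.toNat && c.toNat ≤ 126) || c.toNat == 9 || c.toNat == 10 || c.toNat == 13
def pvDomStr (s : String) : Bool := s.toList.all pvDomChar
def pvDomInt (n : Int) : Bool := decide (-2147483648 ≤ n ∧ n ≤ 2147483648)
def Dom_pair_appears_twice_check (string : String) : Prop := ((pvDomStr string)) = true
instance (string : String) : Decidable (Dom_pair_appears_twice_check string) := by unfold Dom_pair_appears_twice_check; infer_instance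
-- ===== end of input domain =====

-- B replaces A's build-pairs / delete-overlaps / count-duplicates pipeline with a direct
-- two-index scan for an equal letter pair at distance ≥ 2 (objective: simpler).
-- A 2-character Python string "xy" is represented as the pair (Char × Char); equality agrees.

-- ===== PORT A =====
-- while i < len(string)-1: pairs.append(string[i] + string[i+1]); i += 1
def pvPairsLoop (cs : List Char) (i : Nat) (acc : List (Char × Char)) : List (Char × Char) :=
  if i < cs.length - 1 then
    pvPairsLoop cs (i + 1) (acc ++ [(cs.getD i ' ', cs.getD (i + 1) ' ')])
  else acc
termination_by cs.length - 1 - i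
decreasing_by omega

-- while i < len(pairs)-1: if pairs[i][0]==pairs[i][1] and pairs[i]==pairs[i+1]: del pairs[i+1]; i += 1
def pvRmLoop (pairs : List (Char × Char)) (i : Nat) : List (Char × Char) :=
  if h : i < pairs.length - 1 then
    if (pairs.getD i (' ', ' ')).1 = (pairs.getD i (' ', ' ')).2 ∧
        pairs.getD i (' ', ' ') = pairs.getD (i + 1) (' ', ' ') then
      pvRmLoop (pairs.eraseIdx (i + 1)) (i + 1)
    else
      pvRmLoop pairs (i + 1)
  else pairs
termination_by pairs.length - i
decreasing_by
  · have : (pairs.eraseIdx (i + 1)).length = pairs.length - 1 :=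
      List.length_eraseIdx_of_lt (by omega)
    omega
  · omega

def pair_appears_twice_check (string : String) : Bool :=
  let pairs := pvRmLoop (pvPairsLoop string.toList 0 []) 0
  let count := pairs.foldl (fun c p => if 1 < pairs.count p then c + 1 else c) (0 : Int)
  if 0 < count then true else false

-- ===== PORT B =====
-- for j in range(i+2, n-1): if string[i]==string[j] and string[i+1]==string[j+1]: return True
def pvAltInner (cs : List Char) (i j : Nat) : Bool :=
  if j < cs.length - 1 then
    if cs.getD i ' ' = cs.getD j ' ' ∧ cs.getD (i + 1) ' ' = cs.getD (j + 1) ' ' then true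
    else pvAltInner cs i (j + 1)
  else false
termination_by cs.length - 1 - j
decreasing_by omega

-- for i in range(n-1): … return False
def pvAltOuter (cs : List Char) (i : Nat) : Bool :=
  if i < cs.length - 1 then
    if pvAltInner cs i (i + 2) then true else pvAltOuter cs (i + 1)
  else false
termination_by cs.length - 1 - i
decreasing_by omega

def pair_appears_twice_check_alt (string : String) : Bool :=
  pvAltOuter string.toList 0

-- ===== PRECONDITION & SPEC =====
def Spec_pair_appears_twice_check (string : String) (out : Bool) : Prop := out = pair_appears_twice_check_alt string
instance (string : String) (out : Bool) : Decidable (Spec_pair_appears_twice_check string out) := by unfold Spec_pair_appears_twice_check; infer_instance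

-- ===== CLAIM (what is proved, stated in full; the proofs are below) =====
def Claim_equal_pair_appears_twice_check : Prop := ∀ (string : String), Dom_pair_appears_twice_check string → Spec_pair_appears_twice_check string (pair_appears_twice_check string)

-- ===== LEMMAS AND PROOFS =====

-- The mathematical list of letter pairs of cs.
def pvChain (cs : List Char) : List (Char × Char) :=
  (List.range (cs.length - 1)).map fun k => (cs.getD k ' ', cs.getD (k + 1) ' ')

-- A's deletion loop, rephrased as a head-first scan (proved equal to pvRmLoop below).
def pvScan : List (Char × Char) → List (Char × Char)
  | a :: b :: r => if a.1 = a.2 ∧ a = b then a :: pvScan r else a :: pvScan (b :: r)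
  | l => l

-- "some element v sits at an index ≥ 1 of r"
def pvHit1 (r : List (Char × Char)) (v : Char × Char) : Prop :=
  ∃ t, 1 ≤ t ∧ t < r.length ∧ r.getD t (' ', ' ') = v

-- "two equal elements at distance ≥ 2"
def pvGap2 (l : List (Char × Char)) : Prop :=
  ∃ i j, i + 2 ≤ j ∧ j < l.length ∧ l.getD i (' ', ' ') = l.getD j (' ', ' ')

-- "adjacent equal elements are doubled-letter pairs" (true of any pvChain)
def pvOK (l : List (Char × Char)) : Prop :=
  ∀ k, k + 1 < l.length → l.getD k (' ', ' ') = l.getD (k + 1) (' ', ' ') →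
    (l.getD k (' ', ' ')).1 = (l.getD k (' ', ' ')).2

-- "some element occurs at least twice"
def pvDup (l : List (Char × Char)) : Prop := ∃ v, 2 ≤ l.count v

lemma pvPairsLoop_eq (cs : List Char) (i : Nat) (acc : List (Char × Char)) :
    pvPairsLoop cs i acc
      = acc ++ (List.range' i (cs.length - 1 - i)).map
          (fun k => (cs.getD k ' ', cs.getD (k + 1) ' ')) := by
  rw [pvPairsLoop]
  split
  · next h =>
    rw [pvPairsLoop_eq cs (i + 1)]
    have hm : cs.length - 1 - i = (cs.length - 1 - (i + 1)) + 1 := by omega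
    rw [hm, List.range'_succ]
    simp
  · next h =>
    have hm : cs.length - 1 - i = 0 := by omega
    simp [hm]
termination_by cs.length - 1 - i

lemma pvPairsLoop_zero (cs : List Char) : pvPairsLoop cs 0 [] = pvChain cs := by
  rw [pvPairsLoop_eq, pvChain, List.range_eq_range']
  simp

lemma pvScan_short (l : List (Char × Char)) (h : l.length ≤ 1) : pvScan l = l := by
  match l with
  | [] => rfl
  | [x] => rfl
  | a :: b :: r => simp at h

lemma pvRmLoop_eq (l : List (Char × Char)) (i : Nat) :
    pvRmLoop l i = l.take i ++ pvScan (l.drop i) := by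
  rw [pvRmLoop]
  split
  · next h =>
    have hi : i < l.length := by omega
    have hi1 : i + 1 < l.length := by omega
    have hdrop : l.drop i = l[i] :: l[i + 1] :: l.drop (i + 2) := by
      rw [List.drop_eq_getElem_cons hi, List.drop_eq_getElem_cons hi1]
    have hgi : l.getD i (' ', ' ') = l[i] := List.getD_eq_getElem l (' ', ' ') hi
    have hgi1 : l.getD (i + 1) (' ', ' ') = l[i + 1] := List.getD_eq_getElem l (' ', ' ') hi1
    have htk : l.take (i + 1) = l.take i ++ [l[i]] := List.take_succ_eq_append_getElem hi
    have hdrop1 : l.drop (i + 1) = l[i + 1] :: l.drop (i + 2) := List.drop_eq_getElem_cons hi1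
    rw [hgi, hgi1]
    split
    · next hc =>
      rw [pvRmLoop_eq]
      rw [List.eraseIdx_eq_take_drop_succ]
      have hlen1 : (l.take (i + 1)).length = i + 1 := by simp; omega
      rw [List.take_append_of_le_length (by omega), List.drop_append_of_le_length (by omega)]
      rw [List.take_take, List.drop_eq_nil_of_le (by omega)]
      have hscan : pvScan (l[i] :: l[i + 1] :: l.drop (i + 2))
          = l[i] :: pvScan (l.drop (i + 2)) := by
        simp only [pvScan]
        rw [if_pos hc]
      have h2 : i + 1 + 1 = i + 2 := by omega
      simp only [List.nil_append, Nat.min_self, h2]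
      rw [hdrop, hscan, htk, List.append_assoc]
      rfl
    · next hc =>
      rw [pvRmLoop_eq]
      have hscan : pvScan (l[i] :: l[i + 1] :: l.drop (i + 2))
          = l[i] :: pvScan (l[i + 1] :: l.drop (i + 2)) := by
        simp only [pvScan]
        rw [if_neg hc]
      rw [hdrop, hdrop1, hscan, htk, List.append_assoc]
      rfl
  · next h =>
    have hs : (l.drop i).length ≤ 1 := by simp; omega
    rw [pvScan_short _ hs, List.take_append_drop]
termination_by l.length - i
decreasing_by
  all_goals
    have hE : (l.eraseIdx (i + 1)).length = l.length - 1 :=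
      List.length_eraseIdx_of_lt (by omega)
    omega

lemma mem_pvScan (l : List (Char × Char)) (v : Char × Char) : v ∈ pvScan l ↔ v ∈ l := by
  induction l using pvScan.induct with
  | case1 a b r hc ih =>
    simp only [pvScan]
    rw [if_pos hc]
    simp only [List.mem_cons, ih, hc.2]
    tauto
  | case2 a b r hc ih =>
    simp only [pvScan]
    rw [if_neg hc]
    simp only [List.mem_cons, ih]
  | case3 l h1 =>
    match l, h1 with
    | [], _ => rfl
    | [x], _ => rfl
    | a :: b :: r, h1 => exact (h1 a b r rfl).elim

lemma pvDup_cons (a : Char × Char) (m : List (Char × Char)) :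
    pvDup (a :: m) ↔ a ∈ m ∨ pvDup m := by
  unfold pvDup
  constructor
  · rintro ⟨v, hv⟩
    rw [List.count_cons] at hv
    by_cases hva : a = v
    · subst hva
      simp only [BEq.rfl, if_true] at hv
      exact Or.inl (List.count_pos_iff.mp (by omega))
    · right
      exact ⟨v, by simpa [hva] using hv⟩
  · rintro (h | ⟨v, hv⟩)
    · exact ⟨a, by rw [List.count_cons]; have := List.count_pos_iff.mpr h; simp; omega⟩
    · refine ⟨v, ?_⟩
      rw [List.count_cons]
      omega

lemma pvHit1_cons (x v : Char × Char) (r : List (Char × Char)) :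
    pvHit1 (x :: r) v ↔ v ∈ r := by
  constructor
  · rintro ⟨t, h1, hlen, heq⟩
    obtain ⟨t', rfl⟩ : ∃ t', t = t' + 1 := ⟨t - 1, by omega⟩
    rw [List.getD_cons_succ] at heq
    simp only [List.length_cons] at hlen
    have ht' : t' < r.length := by omega
    rw [List.getD_eq_getElem r _ ht'] at heq
    exact heq ▸ List.getElem_mem ht'
  · intro h
    obtain ⟨t, ht, heq⟩ := List.mem_iff_getElem.mp h
    exact ⟨t + 1, by omega, by simp; omega, by rw [List.getD_cons_succ, List.getD_eq_getElem r _ ht]; exact heq⟩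

lemma pvHit1_mem {r : List (Char × Char)} {v : Char × Char} (h : pvHit1 r v) : v ∈ r := by
  obtain ⟨t, _, hlen, heq⟩ := h
  rw [List.getD_eq_getElem r _ hlen] at heq
  exact heq ▸ List.getElem_mem hlen

lemma pvGap2_cons (x : Char × Char) (r : List (Char × Char)) :
    pvGap2 (x :: r) ↔ pvHit1 r x ∨ pvGap2 r := by
  unfold pvGap2 pvHit1
  constructor
  · rintro ⟨i, j, hij, hjl, heq⟩
    obtain ⟨j', rfl⟩ : ∃ j', j = j' + 1 := ⟨j - 1, by omega⟩
    rw [List.getD_cons_succ] at heq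
    simp only [List.length_cons] at hjl
    rcases Nat.eq_zero_or_pos i with hi | hi
    · subst hi
      rw [List.getD_cons_zero] at heq
      exact Or.inl ⟨j', by omega, by omega, heq.symm⟩
    · obtain ⟨i', rfl⟩ : ∃ i', i = i' + 1 := ⟨i - 1, by omega⟩
      rw [List.getD_cons_succ] at heq
      exact Or.inr ⟨i', j', by omega, by omega, heq⟩
  · rintro (⟨t, h1, hlen, heq⟩ | ⟨i, j, hij, hjl, heq⟩)
    · exact ⟨0, t + 1, by omega, by simp; omega,
        by rw [List.getD_cons_zero, List.getD_cons_succ]; exact heq.symm⟩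
    · exact ⟨i + 1, j + 1, by omega, by simp; omega,
        by rw [List.getD_cons_succ, List.getD_cons_succ]; exact heq⟩

lemma pvOK_tail (x : Char × Char) (r : List (Char × Char)) (h : pvOK (x :: r)) : pvOK r := by
  intro k hk heq
  have := h (k + 1) (by simp; omega)
  rw [List.getD_cons_succ, List.getD_cons_succ] at this
  exact this heq

lemma pvDup_pvScan (l : List (Char × Char)) (hOK : pvOK l) : pvDup (pvScan l) ↔ pvGap2 l := by
  induction l using pvScan.induct with
  | case1 a b r hc ih =>
    have hr : pvOK r := pvOK_tail b r (pvOK_tail a (b :: r) hOK)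
    have hscan : pvScan (a :: b :: r) = a :: pvScan r := by
      simp only [pvScan]; rw [if_pos hc]
    rw [hscan, pvDup_cons, mem_pvScan, ih hr, pvGap2_cons, pvGap2_cons, pvHit1_cons]
    constructor
    · rintro (h | h)
      · exact Or.inl h
      · exact Or.inr (Or.inr h)
    · rintro (h | h | h)
      · exact Or.inl h
      · exact Or.inl (hc.2 ▸ pvHit1_mem h)
      · exact Or.inr h
  | case2 a b r hc ih =>
    have hb : pvOK (b :: r) := pvOK_tail a (b :: r) hOK
    have hab : a ≠ b := by
      intro h
      apply hc
      refine ⟨?_, h⟩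
      have := hOK 0 (by simp) (by rw [List.getD_cons_zero, List.getD_cons_succ, List.getD_cons_zero]; exact h)
      rw [List.getD_cons_zero] at this
      exact this
    have hscan : pvScan (a :: b :: r) = a :: pvScan (b :: r) := by
      simp only [pvScan]; rw [if_neg hc]
    rw [hscan, pvDup_cons, mem_pvScan, ih hb, pvGap2_cons (x := a), pvHit1_cons]
    simp only [List.mem_cons, hab, false_or]
  | case3 l h1 =>
    match l, h1 with
    | [], _ =>
      simp only [pvScan]
      constructor
      · rintro ⟨v, hv⟩; simp at hv
      · rintro ⟨i, j, hij, hjl, _⟩; simp at hjl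
    | [x], _ =>
      simp only [pvScan]
      constructor
      · rintro ⟨v, hv⟩
        rw [List.count_cons] at hv
        simp at hv
        split at hv <;> omega
      · rintro ⟨i, j, hij, hjl, _⟩; simp at hjl; omega
    | a :: b :: r, h1 => exact (h1 a b r rfl).elim

lemma pvChain_getD (cs : List Char) (k : Nat) (hk : k < cs.length - 1) :
    (pvChain cs).getD k (' ', ' ') = (cs.getD k ' ', cs.getD (k + 1) ' ') := by
  unfold pvChain
  exact PySem.List.getD_map_range _ _ _ _ hk

lemma pvChain_length (cs : List Char) : (pvChain cs).length = cs.length - 1 := by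
  simp [pvChain]

lemma pvOK_pvChain (cs : List Char) : pvOK (pvChain cs) := by
  intro k hk heq
  rw [pvChain_length] at hk
  rw [pvChain_getD cs k (by omega), pvChain_getD cs (k + 1) (by omega)] at heq
  rw [pvChain_getD cs k (by omega)]
  have := (Prod.mk.injEq _ _ _ _).mp heq
  exact this.1

lemma pvGap2_pvChain (cs : List Char) :
    pvGap2 (pvChain cs) ↔ ∃ i j, i + 2 ≤ j ∧ j < cs.length - 1 ∧
      cs.getD i ' ' = cs.getD j ' ' ∧ cs.getD (i + 1) ' ' = cs.getD (j + 1) ' ' := by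
  unfold pvGap2
  constructor
  · rintro ⟨i, j, hij, hjl, heq⟩
    rw [pvChain_length] at hjl
    rw [pvChain_getD cs i (by omega), pvChain_getD cs j (by omega)] at heq
    have := (Prod.mk.injEq _ _ _ _).mp heq
    exact ⟨i, j, hij, hjl, this.1, this.2⟩
  · rintro ⟨i, j, hij, hjl, h1, h2⟩
    refine ⟨i, j, hij, by rw [pvChain_length]; omega, ?_⟩
    rw [pvChain_getD cs i (by omega), pvChain_getD cs j (by omega), h1, h2]

lemma pvCountLoop (L : List (Char × Char)) :
    (if 0 < L.foldl (fun c p => if 1 < L.count p then c + 1 else c) (0 : Int) then true else false) = true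
      ↔ pvDup L := by
  have hfold : L.foldl (fun c p => if 1 < L.count p then c + 1 else c) (0 : Int)
      = L.foldl (fun c p => if (fun q => decide (1 < L.count q)) p = true then c + 1 else c) 0 := by
    simp only [decide_eq_true_eq]
  rw [hfold, PySem.List.foldl_count_if]
  simp only [zero_add]
  constructor
  · intro h
    split at h
    · next hp =>
      have hp' : 0 < L.countP (fun q => decide (1 < L.count q)) := by exact_mod_cast hp
      obtain ⟨v, _, hv⟩ := List.countP_pos_iff.mp hp'
      exact ⟨v, by simpa using hv⟩
    · simp at h
  · rintro ⟨v, hv⟩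
    rw [if_pos]
    have hm : v ∈ L := List.count_pos_iff.mp (by omega)
    have : 0 < L.countP (fun q => decide (1 < L.count q)) :=
      List.countP_pos_iff.mpr ⟨v, hm, by simp; omega⟩
    exact_mod_cast this

lemma pvA_iff (s : String) :
    pair_appears_twice_check s = true ↔ pvGap2 (pvChain s.toList) := by
  have hL : pvRmLoop (pvPairsLoop s.toList 0 []) 0 = pvScan (pvChain s.toList) := by
    rw [pvPairsLoop_zero, pvRmLoop_eq]
    simp
  simp only [pair_appears_twice_check]
  rw [hL, pvCountLoop, pvDup_pvScan _ (pvOK_pvChain s.toList)]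

lemma pvAltInner_iff (cs : List Char) (i j : Nat) :
    pvAltInner cs i j = true ↔ ∃ k, j ≤ k ∧ k < cs.length - 1 ∧
      cs.getD i ' ' = cs.getD k ' ' ∧ cs.getD (i + 1) ' ' = cs.getD (k + 1) ' ' := by
  rw [pvAltInner]
  split
  · next h =>
    split
    · next hcond =>
      constructor
      · intro _
        exact ⟨j, le_rfl, h, hcond.1, hcond.2⟩
      · intro _
        rfl
    · next hcond =>
      rw [pvAltInner_iff cs i (j + 1)]
      constructor
      · rintro ⟨k, hk1, hk2, hp1, hp2⟩
        exact ⟨k, by omega, hk2, hp1, hp2⟩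
      · rintro ⟨k, hk1, hk2, hp1, hp2⟩
        rcases Nat.eq_or_lt_of_le hk1 with rfl | hlt
        · exact absurd ⟨hp1, hp2⟩ hcond
        · exact ⟨k, by omega, hk2, hp1, hp2⟩
  · next h =>
    constructor
    · intro hf
      simp at hf
    · rintro ⟨k, hk1, hk2, _⟩
      omega
termination_by cs.length - 1 - j

lemma pvAltOuter_iff (cs : List Char) (i : Nat) :
    pvAltOuter cs i = true ↔ ∃ a k, i ≤ a ∧ a + 2 ≤ k ∧ k < cs.length - 1 ∧
      cs.getD a ' ' = cs.getD k ' ' ∧ cs.getD (a + 1) ' ' = cs.getD (k + 1) ' ' := by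
  rw [pvAltOuter]
  split
  · next h =>
    split
    · next hin =>
      constructor
      · intro _
        obtain ⟨k, hk1, hk2, hp1, hp2⟩ := (pvAltInner_iff cs i (i + 2)).mp hin
        exact ⟨i, k, le_rfl, hk1, hk2, hp1, hp2⟩
      · intro _
        rfl
    · next hin =>
      rw [pvAltOuter_iff cs (i + 1)]
      constructor
      · rintro ⟨a, k, ha, hk1, hk2, hp1, hp2⟩
        exact ⟨a, k, by omega, hk1, hk2, hp1, hp2⟩
      · rintro ⟨a, k, ha, hk1, hk2, hp1, hp2⟩
        rcases Nat.eq_or_lt_of_le ha with heq | hlt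
        · subst heq
          exact absurd ((pvAltInner_iff cs i (i + 2)).mpr ⟨k, hk1, hk2, hp1, hp2⟩) hin
        · exact ⟨a, k, by omega, hk1, hk2, hp1, hp2⟩
  · next h =>
    constructor
    · intro hf
      simp at hf
    · rintro ⟨a, k, ha, hk1, hk2, _⟩
      omega
termination_by cs.length - 1 - i

lemma pvB_iff (s : String) :
    pair_appears_twice_check_alt s = true ↔ ∃ i j, i + 2 ≤ j ∧ j < s.toList.length - 1 ∧
      s.toList.getD i ' ' = s.toList.getD j ' ' ∧
      s.toList.getD (i + 1) ' ' = s.toList.getD (j + 1) ' ' := by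
  rw [pair_appears_twice_check_alt, pvAltOuter_iff]
  constructor
  · rintro ⟨a, k, _, hk1, hk2, hp1, hp2⟩
    exact ⟨a, k, hk1, hk2, hp1, hp2⟩
  · rintro ⟨i, j, h1, h2, h3, h4⟩
    exact ⟨i, j, Nat.zero_le _, h1, h2, h3, h4⟩

-- ===== VERDICT (by name: the statement is the Claim_ definition above) =====
theorem pair_appears_twice_check_spec : Claim_equal_pair_appears_twice_check := by
  intro s _
  show pair_appears_twice_check s = pair_appears_twice_check_alt s
  rw [Bool.eq_iff_iff, pvA_iff, pvB_iff, pvGap2_pvChain]
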